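-- pv_equiv track=rewrite | github.com/Sondanha/coding-test-problem-solving | 프로그래머스/0/181860. 빈 배열에 추가， 삭제하기/빈 배열에 추가， 삭제하기.py | solution
-- ===== SOURCE A (Python) =====
-- def solution(arr, flag):
--     answer = []
--
--     for idx, tf in enumerate(flag):
--         if tf:
--             for i in range(arr[idx]*2):
--                 answer.append(arr[idx])
--         else:
--             answer = answer[:-arr[idx]]
--     return answer
-- ===== SOURCE B (Python) =====
-- def solution(arr, flag):
--     # Run-length strategy: keep (value, count) blocks instead of the expanded
--     # list; a deletion pops/shrinks blocks from the end; expand once at the end.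
--     runs = []                       # (value, count) blocks, oldest first
--     for v, tf in zip(arr, flag):
--         if tf:
--             if v > 0:
--                 runs.append((v, 2 * v))
--         else:
--             drop = v
--             while drop > 0 and runs:
--                 val, cnt = runs[-1]
--                 if cnt <= drop:
--                     runs.pop()
--                     drop -= cnt
--                 else:
--                     runs[-1] = (val, cnt - drop)
--                     drop = 0
--     out = []
--     for val, cnt in runs:
--         out.extend([val] * cnt)
--     return out
-- ===== Notes on version B (the rewrite author's own statement) =====
-- stated objective: faster
-- what changed: B replaces replaying the answer list (per-element appends and full-copy suffix slices) with a run-length list of (value,count) blocks: a deletion pops/shrinks blocks from the end and the list is expanded once at the end; Pre_ restricts to the problem's stated domain (flag no longer than arr, and positive arr values at delete positions): outside it A raises IndexError or its answer[:-arr[idx]] slice behaviour (emptying on 0, prefix-keep on negatives) is an accident of Python slicing that a count-based deletion does not reproduce.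
-- outside the precondition, e.g. on solution([2, 0], [True, False]): A returns [], B returns [2, 2, 2, 2]; on solution([2, -1], [True, False]): A returns [2], B returns [2, 2, 2, 2]
import Mathlib
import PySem

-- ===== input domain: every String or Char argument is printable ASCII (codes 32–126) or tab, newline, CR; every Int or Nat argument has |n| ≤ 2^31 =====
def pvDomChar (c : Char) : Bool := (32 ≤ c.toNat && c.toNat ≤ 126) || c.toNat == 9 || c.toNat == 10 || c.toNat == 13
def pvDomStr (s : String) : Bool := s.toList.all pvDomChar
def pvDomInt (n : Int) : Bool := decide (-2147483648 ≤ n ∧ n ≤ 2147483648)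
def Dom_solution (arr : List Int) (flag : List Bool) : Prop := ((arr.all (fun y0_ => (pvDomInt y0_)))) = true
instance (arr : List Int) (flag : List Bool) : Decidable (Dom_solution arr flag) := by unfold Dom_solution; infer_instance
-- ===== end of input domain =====

-- B replaces the replayed list (appends + slice copies) by run-length (value, count)
-- blocks truncated from the end, expanded once at the end: asymptotically faster.

-- ===== PORT A =====
-- one iteration of A's loop body (idx, tf from enumerate(flag))
def pvStepA (arr : List Int) (answer : List Int) (it : Int × Bool) : List Int :=
  let v := PySem.List.pyGetD arr it.1 0
  if it.2 then
    (PySem.List.pyRange 0 (v * 2) 1).foldl (fun a _ => a ++ [v]) answer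
  else
    PySem.List.slice answer none (some (-v))

def solution (arr : List Int) (flag : List Bool) : List Int :=
  (PySem.List.enumerate flag 0).foldl (pvStepA arr) []

-- ===== PORT B =====
-- B keeps runs newest-block-first (Python appends/pops at the end; a Lean list
-- works at the head); pvTrunc is Source B's while-loop over 'drop'.
def pvTrunc : List (Int × Int) → Int → List (Int × Int)
  | [], _ => []
  | (val, cnt) :: rest, drop =>
    if drop ≤ 0 then (val, cnt) :: rest
    else if cnt ≤ drop then pvTrunc rest (drop - cnt)
    else (val, cnt - drop) :: rest

def pvStepB (st : List (Int × Int)) (it : Int × Bool) : List (Int × Int) :=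
  if it.2 then
    if 0 < it.1 then (it.1, 2 * it.1) :: st else st
  else
    pvTrunc st it.1

-- Source B's final expansion loop (runs stored newest-first, so reverse first)
def pvExpand (rs : List (Int × Int)) : List Int :=
  rs.reverse.flatMap (fun p => List.replicate p.2.toNat p.1)

def solution_alt (arr : List Int) (flag : List Bool) : List Int :=
  pvExpand ((arr.zip flag).foldl pvStepB [])

-- ===== PRECONDITION & SPEC =====
-- Pre_ restricts to the problem's natural domain: flag no longer than arr (else
-- A raises IndexError on arr[idx]) and a positive arr value at every delete
-- (falsy-flag) position — outside that, A's answer[:-arr[idx]] slice (emptying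
-- the list on 0, keeping a prefix on negatives) is an accident of Python
-- slicing that a count-based deletion does not reproduce.
def Pre_solution (arr : List Int) (flag : List Bool) : Prop :=
  flag.length ≤ arr.length ∧
    ((arr.zip flag).all (fun p => p.2 || decide (0 < p.1))) = true
instance (arr : List Int) (flag : List Bool) : Decidable (Pre_solution arr flag) := by
  unfold Pre_solution; infer_instance
def pvWitness_solution : List Int × List Bool := ([1, 2], [true, false])

def Spec_solution (arr : List Int) (flag : List Bool) (out : List Int) : Prop := out = solution_alt arr flag
instance (arr : List Int) (flag : List Bool) (out : List Int) : Decidable (Spec_solution arr flag out) := by unfold Spec_solution; infer_instance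

-- ===== CLAIM (what is proved, stated in full; the proofs are below) =====
def Claim_equal_solution : Prop := ∀ (arr : List Int) (flag : List Bool), Dom_solution arr flag → Pre_solution arr flag → Spec_solution arr flag (solution arr flag)

-- ===== LEMMAS AND PROOFS =====

lemma pvExpand_cons (v c : Int) (rest : List (Int × Int)) :
    pvExpand ((v, c) :: rest) = pvExpand rest ++ List.replicate c.toNat v := by
  simp [pvExpand]

-- pvTrunc drops the last d elements of the expansion and keeps counts positive
lemma pvTrunc_spec : ∀ (rs : List (Int × Int)) (d : Int), 0 ≤ d → (∀ p ∈ rs, 0 < p.2) →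
    pvExpand (pvTrunc rs d) = (pvExpand rs).take ((pvExpand rs).length - d.toNat)
      ∧ ∀ p ∈ pvTrunc rs d, 0 < p.2 := by
  intro rs
  induction rs with
  | nil => intro d hd hp; simp [pvTrunc, pvExpand]
  | cons hd tl ih =>
    intro d hdn hp
    obtain ⟨v, c⟩ := hd
    have hc : 0 < c := hp (v, c) (by simp)
    have hptl : ∀ p ∈ tl, 0 < p.2 := fun p hm => hp p (by simp [hm])
    rw [pvTrunc]
    split_ifs with h1 h2
    · -- d ≤ 0, hence d = 0
      have : d = 0 := le_antisymm h1 hdn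
      subst this
      constructor
      · simp
      · simpa using hp
    · -- c ≤ d : pop whole block, recurse
      obtain ⟨ih1, ih2⟩ := ih (d - c) (by omega) hptl
      refine ⟨?_, ih2⟩
      rw [ih1, pvExpand_cons]
      have hk : (pvExpand tl).length - (d - c).toNat
          = (pvExpand tl ++ List.replicate c.toNat v).length - d.toNat := by
        simp only [List.length_append, List.length_replicate]
        omega
      rw [← hk]
      rw [List.take_append_of_le_length (by omega)]
    · -- 0 < d < c : shrink the last block
      refine ⟨?_, ?_⟩
      · rw [pvExpand_cons, pvExpand_cons]
        have hlen : (pvExpand tl ++ List.replicate c.toNat v).length - d.toNat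
            = (pvExpand tl).length + (c - d).toNat := by
          rw [List.length_append, List.length_replicate]
          omega
        rw [hlen, List.take_length_add_append, List.take_replicate]
        congr 2
        omega
      · intro p hm
        rcases List.mem_cons.mp hm with h | h
        · subst h; simp; omega
        · exact hptl p h

-- the loop invariant: A's answer is the expansion of B's run list (index n is
-- A's enumerate counter; B consumes arr.drop n zipped with the remaining flags)
lemma pvLoop (arr : List Int) : ∀ (fl : List Bool) (n : Nat) (answer : List Int)
    (rs : List (Int × Int)),
    n + fl.length ≤ arr.length →
    (((arr.drop n).zip fl).all (fun p => p.2 || decide (0 < p.1))) = true →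
    answer = pvExpand rs → (∀ p ∈ rs, 0 < p.2) →
    (PySem.List.enumerate fl (n : Int)).foldl (pvStepA arr) answer
      = pvExpand (((arr.drop n).zip fl).foldl pvStepB rs) := by
  intro fl
  induction fl with
  | nil => intro n answer rs _ _ ha _; simpa [PySem.List.enumerate_nil] using ha
  | cons f fs ih =>
    intro n answer rs hlen hpos ha hp
    have hn : n < arr.length := by simp at hlen; omega
    have hdrop : arr.drop n = arr[n] :: arr.drop (n + 1) := List.drop_eq_getElem_cons hn
    set v := arr[n] with hv
    have hget : PySem.List.pyGetD arr (n : Int) 0 = v := by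
      rw [PySem.List.pyGetD_natCast, List.getD_eq_getElem?_getD, List.getElem?_eq_getElem hn]
      rfl
    rw [hdrop] at hpos ⊢
    simp only [List.zip_cons_cons, List.all_cons, Bool.and_eq_true] at hpos
    obtain ⟨hposf, hpostl⟩ := hpos
    rw [PySem.List.enumerate_cons]
    simp only [List.zip_cons_cons, List.foldl_cons]
    have htail : ∀ (answer' : List Int) (rs' : List (Int × Int)),
        answer' = pvExpand rs' → (∀ p ∈ rs', 0 < p.2) →
        (PySem.List.enumerate fs ((n : Int) + 1)).foldl (pvStepA arr) answer'
          = pvExpand (((arr.drop (n + 1)).zip fs).foldl pvStepB rs') := by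
      intro answer' rs' ha' hp'
      have := ih (n + 1) answer' rs' (by simp at hlen ⊢; omega) hpostl ha' hp'
      simpa [Nat.cast_add] using this
    cases f with
    | true =>
      have hstepA : pvStepA arr answer ((n : Int), true)
          = answer ++ List.replicate (v * 2).toNat v := by
        simp [pvStepA, hget, PySem.List.length_pyRange_one]
      rw [hstepA]
      by_cases hvp : 0 < v
      · have hstepB : pvStepB rs (v, true) = (v, 2 * v) :: rs := by
          simp [pvStepB, hvp]
        rw [hstepB]
        apply htail
        · rw [pvExpand_cons, ha]
          congr 2
          omega
        · intro p hm
          rcases List.mem_cons.mp hm with h | h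
          · subst h; simpa using hvp
          · exact hp p h
      · have hstepB : pvStepB rs (v, true) = rs := by
          simp [pvStepB, hvp]
        rw [hstepB]
        have : (v * 2).toNat = 0 := by omega
        rw [this]
        simpa using htail answer rs ha hp
    | false =>
      have hvp : 0 < v := by simpa using hposf
      have hstepA : pvStepA arr answer ((n : Int), false) = answer.take (answer.length - v.toNat) := by
        simp only [pvStepA, hget, if_neg (by simp : ¬ (false = true))]
        have hvn : -v = -((v.toNat : Int)) := by omega
        rw [hvn, PySem.List.slice_to_neg_natCast answer v.toNat (by omega)]
      have hstepB : pvStepB rs (v, false) = pvTrunc rs v := by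
        simp [pvStepB]
      rw [hstepA, hstepB]
      obtain ⟨htr1, htr2⟩ := pvTrunc_spec rs v (by omega) hp
      exact htail _ _ (by rw [htr1, ha]) htr2

-- ===== VERDICT (by name: the statement is the Claim_ definition above) =====
theorem solution_spec : Claim_equal_solution := by
  intro arr flag _ hpre
  unfold Spec_solution solution solution_alt
  exact (pvLoop arr flag 0 [] [] (by simpa using hpre.1) (by simpa using hpre.2) rfl (by simp)).symm ▸ rfl
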